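-- pv_equiv track=rewrite | github.com/Wombatlord/png-codec | src/filters.py | minumum_sum_of_absolute_differences
-- ===== SOURCE A (Python) =====
-- class I8(int):
--     def __new__(cls, val):
--         i = int.__new__(cls, val) & 0xFF
--         if i > 127:
--             i = (i & 0b01111111) - 128
--         return i
--
-- def minumum_sum_of_absolute_differences(filtered_data, stride) -> list[int]:
--     line_scores = []
--     filter_stride = stride + 1
--
--     for line in range(0, len(filtered_data), filter_stride):
--         score = 0
--         for i, b in enumerate(filtered_data[line:line+filter_stride]):
--             if i % (filter_stride) == 0:
--                 continue
--             score += abs(I8(b))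
--
--         line_scores.append(score)
--
--     return line_scores
-- ===== SOURCE B (Python) =====
-- class I8(int):
--     def __new__(cls, val):
--         i = int.__new__(cls, val) & 0xFF
--         if i > 127:
--             i = (i & 0b01111111) - 128
--         return i
--
-- def minumum_sum_of_absolute_differences(filtered_data, stride) -> list[int]:
--     filter_stride = stride + 1
--     if filter_stride <= 0:
--         return []
--     line_scores = []
--     for i, b in enumerate(filtered_data):
--         if i % filter_stride == 0:
--             line_scores.append(0)
--         else:
--             line_scores[-1] += abs(I8(b))
--     return line_scores
-- ===== Notes on version B (the rewrite author's own statement) =====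
-- stated objective: alternative
-- what changed: Replaces the nested loops (outer range-stepped chunking plus inner enumerate-with-skip over each slice) by a single linear pass over enumerate(filtered_data) that starts a new score on i % filter_stride == 0 and otherwise adds abs(I8(b)) to the last score, with no slicing.
-- outside the precondition, e.g. on minumum_sum_of_absolute_differences([1], -1): A raises ValueError, B returns []
import Mathlib
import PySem

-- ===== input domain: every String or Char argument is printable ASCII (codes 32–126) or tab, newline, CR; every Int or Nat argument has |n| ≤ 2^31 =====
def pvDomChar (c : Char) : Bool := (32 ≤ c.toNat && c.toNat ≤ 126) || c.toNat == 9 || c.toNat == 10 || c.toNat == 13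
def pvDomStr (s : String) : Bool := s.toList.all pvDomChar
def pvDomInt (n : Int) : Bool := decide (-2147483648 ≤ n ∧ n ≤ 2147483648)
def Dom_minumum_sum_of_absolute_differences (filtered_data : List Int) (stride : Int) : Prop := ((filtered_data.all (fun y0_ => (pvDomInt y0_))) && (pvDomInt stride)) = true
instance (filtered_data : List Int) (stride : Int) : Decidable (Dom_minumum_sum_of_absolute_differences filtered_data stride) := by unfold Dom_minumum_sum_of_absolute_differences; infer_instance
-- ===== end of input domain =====

-- B replaces A's nested chunk-and-slice loops with a single linear pass over
-- enumerate(filtered_data), starting a fresh score whenever i % filter_stride == 0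
-- (objective: alternative, same cost; equal return values on stride ≠ -1, where A's range() raises).
-- ===== PORT A =====
-- helper I8(val): 'int(val) & 0xFF' is val mod 256 for every Python int (two's-complement '&'),
-- and 'i & 0b01111111' for 0 ≤ i is i mod 128 (exact on all ints).
def pvI8 (val : Int) : Int :=
  let i := PySem.Int.mod val 256
  if 127 < i then (PySem.Int.mod i 128) - 128 else i

def minumum_sum_of_absolute_differences (filtered_data : List Int) (stride : Int) : List Int :=
  let filter_stride := stride + 1
  (PySem.List.pyRange 0 (filtered_data.length : Int) filter_stride).foldl
    (fun line_scores line =>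
      let score :=
        (PySem.List.enumerate (PySem.List.slice filtered_data (some line) (some (line + filter_stride))) 0).foldl
          (fun score ib =>
            if PySem.Int.mod ib.1 filter_stride == 0 then score
            else score + |pvI8 ib.2|) 0
      line_scores ++ [score]) []

-- ===== PORT B =====
def minumum_sum_of_absolute_differences_alt (filtered_data : List Int) (stride : Int) : List Int :=
  let filter_stride := stride + 1
  if filter_stride ≤ 0 then []
  else
    (PySem.List.enumerate filtered_data 0).foldl
      (fun line_scores ib =>
        if PySem.Int.mod ib.1 filter_stride == 0 then line_scores ++ [0]
        else
          -- 'line_scores[-1] += abs(I8(b))': line_scores is nonempty here (index 0 took the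
          -- other branch), so the in-place update of the last element is dropLast ++ [last + v]
          line_scores.dropLast ++ [line_scores.getLastD 0 + |pvI8 ib.2|]) []

-- ===== PRECONDITION & SPEC =====
-- Pre_ excludes only stride = -1, where Python's range(0, len, 0) raises ValueError.
def Pre_minumum_sum_of_absolute_differences (filtered_data : List Int) (stride : Int) : Prop :=
  stride ≠ -1

instance (filtered_data : List Int) (stride : Int) : Decidable (Pre_minumum_sum_of_absolute_differences filtered_data stride) := by
  unfold Pre_minumum_sum_of_absolute_differences; infer_instance

def pvWitness_minumum_sum_of_absolute_differences : List Int × Int := ([1, 200, -3, 4, 5], 1)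

def Spec_minumum_sum_of_absolute_differences (filtered_data : List Int) (stride : Int) (out : List Int) : Prop := out = minumum_sum_of_absolute_differences_alt filtered_data stride
instance (filtered_data : List Int) (stride : Int) (out : List Int) : Decidable (Spec_minumum_sum_of_absolute_differences filtered_data stride out) := by unfold Spec_minumum_sum_of_absolute_differences; infer_instance

-- ===== CLAIM (what is proved, stated in full; the proofs are below) =====
def Claim_equal_minumum_sum_of_absolute_differences : Prop := ∀ (filtered_data : List Int) (stride : Int), Dom_minumum_sum_of_absolute_differences filtered_data stride → Pre_minumum_sum_of_absolute_differences filtered_data stride → Spec_minumum_sum_of_absolute_differences filtered_data stride (minumum_sum_of_absolute_differences filtered_data stride)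

-- ===== LEMMAS AND PROOFS =====

-- per-element contribution abs(I8(b))
def pvF (b : Int) : Int := |pvI8 b|

def sumAbs (l : List Int) : Int := (l.map pvF).sum

-- common reference: one score per chunk of size fs (fs ≥ 1), skipping each chunk's first byte
def gScores (fs : Nat) : List Int → List Int
  | [] => []
  | _ :: t => sumAbs (t.take (fs - 1)) :: gScores fs (t.drop (fs - 1))
  termination_by l => l.length
  decreasing_by simp

theorem gScores_nil (fs : Nat) : gScores fs [] = [] := by
  rw [gScores]

theorem gScores_cons (fs : Nat) (a : Int) (t : List Int) :
    gScores fs (a :: t) = sumAbs (t.take (fs - 1)) :: gScores fs (t.drop (fs - 1)) := by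
  rw [gScores]

theorem pyRange_pos_nil {a b fs : Int} (hfs : 0 < fs) (h : b ≤ a) :
    PySem.List.pyRange a b fs = [] := by
  rw [PySem.List.pyRange_of_pos _ _ hfs]
  simp [if_neg (not_lt.mpr h)]

theorem pyRange_pos_cons {a b fs : Int} (hfs : 0 < fs) (h : a < b) :
    PySem.List.pyRange a b fs = a :: (PySem.List.pyRange a (b - fs) fs).map (· + fs) := by
  rw [PySem.List.pyRange_of_pos _ _ hfs, PySem.List.pyRange_of_pos _ _ hfs]
  rw [if_pos h]
  have hq0 : 0 ≤ (b - a - 1) / fs := Int.ediv_nonneg (by omega) (by omega)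
  have hc : (b - a + fs - 1) / fs = (b - a - 1) / fs + 1 := by
    have h1 := Int.add_mul_ediv_right (b - a - 1) 1 (ne_of_gt hfs)
    have h2 : b - a + fs - 1 = b - a - 1 + 1 * fs := by ring
    rw [h2, h1]
  have hc' : (if a < b - fs then ((b - fs - a + fs - 1) / fs).toNat else 0)
      = ((b - a - 1) / fs).toNat := by
    split
    · have h3 : b - fs - a + fs - 1 = b - a - 1 := by ring
      rw [h3]
    · have h4 : (b - a - 1) / fs = 0 := Int.ediv_eq_zero_of_lt (by omega) (by omega)
      simp [h4]
  rw [hc', hc]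
  have h5 : ((b - a - 1) / fs + 1).toNat = ((b - a - 1) / fs).toNat + 1 := by omega
  rw [h5, List.range_succ_eq_map]
  rw [List.map_cons]
  congr 1
  · simp
  · rw [List.map_map, List.map_map]
    apply List.map_congr_left
    intro k _
    simp only [Function.comp_apply, Nat.succ_eq_add_one]
    push_cast
    ring

theorem mod_self_of_small {j fs : Int} (h0 : 0 ≤ j) (h : j < fs) :
    PySem.Int.mod j fs = j := by
  rw [PySem.Int.mod_eq_emod_of_pos (lt_of_le_of_lt h0 h)]
  exact Int.emod_eq_of_lt h0 h

-- inner loop of A past index 0 of a chunk: no further index is divisible, everything is summed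
theorem innerRunA {fs : Int} :
    ∀ (t : List Int) (j s : Int), 0 < j → j + (t.length : Int) ≤ fs →
      (PySem.List.enumerate t j).foldl
        (fun score ib => if PySem.Int.mod ib.1 fs == 0 then score else score + |pvI8 ib.2|) s
      = s + sumAbs t := by
  intro t
  induction t with
  | nil => intro j s _ _; simp [PySem.List.enumerate_nil, sumAbs]
  | cons b u ih =>
    intro j s hj hle
    rw [PySem.List.enumerate_cons]
    simp only [List.foldl_cons]
    have hlen : j + (u.length : Int) + 1 ≤ fs := by
      simp only [List.length_cons] at hle; push_cast at hle; omega
    have hm : PySem.Int.mod j fs = j := mod_self_of_small hj.le (by omega)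
    rw [hm]
    have hne : (j == 0) = false := by simp; omega
    rw [hne]
    simp only [Bool.false_eq_true, if_false]
    rw [ih (j + 1) _ (by omega) (by omega)]
    simp [sumAbs, pvF]
    ring

theorem scoreA_eq_sumAbs {fs : Int} (hfs : 0 < fs) (c : List Int) (hlen : (c.length : Int) ≤ fs) :
    (PySem.List.enumerate c 0).foldl
      (fun score ib => if PySem.Int.mod ib.1 fs == 0 then score else score + |pvI8 ib.2|) 0
    = sumAbs c.tail := by
  cases c with
  | nil => simp [PySem.List.enumerate_nil, sumAbs]
  | cons a t =>
    rw [PySem.List.enumerate_cons]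
    simp only [List.foldl_cons]
    have hm : PySem.Int.mod 0 fs = 0 := mod_self_of_small le_rfl hfs
    rw [hm]
    simp only [BEq.rfl, if_true]
    rw [innerRunA t (0 + 1) 0 (by norm_num) (by simp at hlen ⊢; omega)]
    simp

theorem portA_gen {fs : Int} (hfs : 0 < fs) :
    ∀ (n : Nat) (l : List Int), l.length = n → ∀ (acc : List Int),
      (PySem.List.pyRange 0 (l.length : Int) fs).foldl
        (fun line_scores line =>
          line_scores ++ [(PySem.List.enumerate (PySem.List.slice l (some line) (some (line + fs))) 0).foldl
            (fun score ib => if PySem.Int.mod ib.1 fs == 0 then score else score + |pvI8 ib.2|) 0]) acc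
      = acc ++ gScores fs.toNat l := by
  intro n
  induction n using Nat.strong_induction_on with
  | _ n ih =>
    intro l hl acc
    cases l with
    | nil =>
      simp only [List.length_nil, Int.natCast_zero]
      rw [pyRange_pos_nil hfs le_rfl]
      simp [gScores_nil]
    | cons a t =>
      obtain ⟨m, hm⟩ : ∃ m, fs.toNat = m + 1 := ⟨fs.toNat - 1, by omega⟩
      have hpos : (0 : Int) < ((a :: t).length : Int) := by simp
      rw [pyRange_pos_cons hfs hpos]
      simp only [List.foldl_cons, List.foldl_map]
      -- head score: slice l 0 fs = take fs
      have hslice0 : PySem.List.slice (a :: t) (some 0) (some (0 + fs)) = (a :: t).take fs.toNat := by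
        rw [zero_add]
        simp only [PySem.List.slice_zero_start]
        exact PySem.List.slice_to _ hfs.le
      rw [hslice0]
      have hscore0 : (PySem.List.enumerate ((a :: t).take fs.toNat) 0).foldl
            (fun score ib => if PySem.Int.mod ib.1 fs == 0 then score else score + |pvI8 ib.2|) 0
          = sumAbs (t.take (fs.toNat - 1)) := by
        rw [scoreA_eq_sumAbs hfs _ (by simp; omega)]
        rw [hm, List.take_succ_cons, List.tail_cons]
        simp
      rw [hscore0]
      -- remaining chunks live in l.drop fs.toNat
      have hcongr : ∀ (acc' : List Int), ∀ line ∈ PySem.List.pyRange 0 (((a :: t).length : Int) - fs) fs,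
          acc' ++ [(PySem.List.enumerate (PySem.List.slice (a :: t) (some (line + fs)) (some (line + fs + fs))) 0).foldl
            (fun score ib => if PySem.Int.mod ib.1 fs == 0 then score else score + |pvI8 ib.2|) 0]
          = acc' ++ [(PySem.List.enumerate (PySem.List.slice ((a :: t).drop fs.toNat) (some line) (some (line + fs))) 0).foldl
            (fun score ib => if PySem.Int.mod ib.1 fs == 0 then score else score + |pvI8 ib.2|) 0] := by
        intro acc' line hline
        have h0 : 0 ≤ line := ((PySem.List.mem_pyRange_iff_of_pos hfs line).mp hline).1
        have hsl : PySem.List.slice (a :: t) (some (line + fs)) (some (line + fs + fs))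
            = PySem.List.slice ((a :: t).drop fs.toNat) (some line) (some (line + fs)) := by
          rw [PySem.List.slice_toNat _ (by omega) (by omega),
              PySem.List.slice_toNat _ (by omega) (by omega)]
          rw [List.drop_drop]
          congr 1
          · omega
          · congr 1; omega
        rw [hsl]
      rw [PySem.List.foldl_congr_mem _ _ _ _ hcongr]
      -- align the range with the dropped list's length
      have hlen1 : ((a :: t).length : Int) = (t.length : Int) + 1 := by simp
      have hlen2 : ((a :: t).drop fs.toNat).length = t.length + 1 - fs.toNat := by
        simp
      have hrange : PySem.List.pyRange 0 (((a :: t).length : Int) - fs) fs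
          = PySem.List.pyRange 0 ((((a :: t).drop fs.toNat).length : Int)) fs := by
        by_cases hfl : fs ≤ ((a :: t).length : Int)
        · congr 1
          rw [hlen2, hlen1]
          omega
        · rw [pyRange_pos_nil hfs (by omega), pyRange_pos_nil hfs (by rw [hlen2]; rw [hlen1] at hfl; omega)]
      rw [hrange]
      have hn : t.length + 1 = n := by simpa using hl
      have hdec : ((a :: t).drop fs.toNat).length < n := by
        rw [hlen2]
        omega
      rw [ih _ hdec _ rfl]
      have hdrop : (a :: t).drop fs.toNat = t.drop (fs.toNat - 1) := by
        rw [hm, List.drop_succ_cons]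
        simp
      rw [hdrop]
      rw [gScores_cons]
      simp

theorem innerRunB {fs : Int} :
    ∀ (u : List Int) (j : Int) (acc : List Int) (cur : Int),
      (∀ k : Nat, k < u.length → PySem.Int.mod (j + (k : Int)) fs ≠ 0) →
      (PySem.List.enumerate u j).foldl
        (fun line_scores ib =>
          if PySem.Int.mod ib.1 fs == 0 then line_scores ++ [0]
          else line_scores.dropLast ++ [line_scores.getLastD 0 + |pvI8 ib.2|]) (acc ++ [cur])
      = acc ++ [cur + sumAbs u] := by
  intro u
  induction u with
  | nil => intro j acc cur _; simp [PySem.List.enumerate_nil, sumAbs]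
  | cons b v ih =>
    intro j acc cur hnd
    rw [PySem.List.enumerate_cons]
    simp only [List.foldl_cons]
    have hj : PySem.Int.mod j fs ≠ 0 := by
      have := hnd 0 (by simp)
      simpa using this
    have hne : (PySem.Int.mod j fs == 0) = false := by simpa using hj
    rw [hne]
    simp only [Bool.false_eq_true, if_false, List.dropLast_concat, List.getLastD_concat]
    rw [ih (j + 1) acc (cur + |pvI8 b|) (by
      intro k hk
      have := hnd (k + 1) (by simpa using Nat.succ_lt_succ hk)
      have harg : j + ((k + 1 : Nat) : Int) = j + 1 + (k : Int) := by push_cast; ring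
      rwa [harg] at this)]
    simp [sumAbs, pvF]
    ring

theorem portB_gen {fs : Int} (hfs : 0 < fs) :
    ∀ (n : Nat) (l : List Int), l.length = n → ∀ (j : Int) (acc : List Int),
      0 ≤ j → PySem.Int.mod j fs = 0 →
      (PySem.List.enumerate l j).foldl
        (fun line_scores ib =>
          if PySem.Int.mod ib.1 fs == 0 then line_scores ++ [0]
          else line_scores.dropLast ++ [line_scores.getLastD 0 + |pvI8 ib.2|]) acc
      = acc ++ gScores fs.toNat l := by
  intro n
  induction n using Nat.strong_induction_on with
  | _ n ih =>
    intro l hl j acc hj0 hjm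
    cases l with
    | nil => simp [PySem.List.enumerate_nil, gScores_nil]
    | cons a t =>
      rw [PySem.List.enumerate_cons]
      simp only [List.foldl_cons]
      rw [hjm]
      simp only [BEq.rfl, if_true]
      -- split the tail at the end of the current chunk
      have hsplit : t = t.take (fs.toNat - 1) ++ t.drop (fs.toNat - 1) :=
        (List.take_append_drop _ _).symm
      rw [show PySem.List.enumerate t (j + 1)
          = PySem.List.enumerate (t.take (fs.toNat - 1)) (j + 1)
            ++ PySem.List.enumerate (t.drop (fs.toNat - 1)) (j + 1 + ((t.take (fs.toNat - 1)).length : Int)) from by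
        conv_lhs => rw [hsplit]
        rw [PySem.List.enumerate_append]]
      rw [List.foldl_append]
      have hfsdvd : fs ∣ j := by
        rw [PySem.Int.mod_eq_emod_of_pos hfs] at hjm
        exact Int.dvd_of_emod_eq_zero hjm
      have hrun := innerRunB (t.take (fs.toNat - 1)) (j + 1) acc 0 (by
        intro k hk
        have hklt : (k : Int) + 1 < fs := by
          have : (t.take (fs.toNat - 1)).length ≤ fs.toNat - 1 := by
            simp [List.length_take]
          omega
        have harg : j + 1 + (k : Int) = j + (1 + (k : Int)) := by ring
        rw [harg, PySem.Int.mod_eq_emod_of_pos hfs]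
        rw [Int.add_emod, Int.emod_eq_zero_of_dvd hfsdvd, zero_add,
            Int.emod_emod_of_dvd _ dvd_rfl, Int.emod_eq_of_lt (by omega) (by omega)]
        omega)
      rw [hrun]
      by_cases hlong : fs.toNat - 1 ≤ t.length
      · have hlen : ((t.take (fs.toNat - 1)).length : Int) = fs - 1 := by
          simp [List.length_take]
          omega
        rw [hlen]
        have hoff : j + 1 + (fs - 1) = j + fs := by ring
        rw [hoff]
        have hdec : (t.drop (fs.toNat - 1)).length < n := by
          simp only [List.length_drop, List.length_cons] at *
          omega
        rw [ih _ hdec _ rfl (j + fs) _ (by omega) (by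
          rw [PySem.Int.mod_eq_emod_of_pos hfs, Int.add_emod_right,
              ← PySem.Int.mod_eq_emod_of_pos hfs]
          exact hjm)]
        rw [gScores_cons]
        simp
      · have hdropnil : t.drop (fs.toNat - 1) = [] := by
          apply List.drop_eq_nil_of_le
          omega
        rw [hdropnil]
        simp only [PySem.List.enumerate_nil, List.foldl_nil]
        rw [gScores_cons, hdropnil]
        simp [gScores_nil]

-- ===== VERDICT (by name: the statement is the Claim_ definition above) =====
theorem minumum_sum_of_absolute_differences_spec : Claim_equal_minumum_sum_of_absolute_differences := by
  intro l stride _hdom hpre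
  unfold Spec_minumum_sum_of_absolute_differences
  unfold minumum_sum_of_absolute_differences minumum_sum_of_absolute_differences_alt
  by_cases hle : stride + 1 ≤ 0
  · have hne : stride + 1 ≠ 0 := fun h => hpre (by omega)
    rw [if_pos hle]
    have hnil : PySem.List.pyRange 0 (l.length : Int) (stride + 1) = [] := by
      simp only [PySem.List.pyRange]
      rw [if_neg hne]
      have h1 : ¬ (0 : Int) < stride + 1 := by omega
      have h2 : ¬ ((l.length : Int) < 0) := by omega
      simp [h1, h2]
    simp only [hnil, List.foldl_nil]
  · have hlt : (0 : Int) < stride + 1 := not_le.mp hle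
    rw [if_neg hle]
    rw [portA_gen hlt _ l rfl [], portB_gen hlt _ l rfl 0 [] le_rfl (mod_self_of_small le_rfl hlt)]
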